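-- pv_equiv track=rewrite | github.com/mohammadfaiizan/ProjectI | DSA/Problem/Graph/07_Topological_Sort_DAG/1591_Strange_Printer_II.py | isPrintable_iterative_removal
-- ===== SOURCE A (Python) =====
-- from typing import List, Set, Dict, Tuple
--
-- def isPrintable_iterative_removal(targetGrid: List[List[int]]) -> bool:
--     """
--     Approach 3: Iterative Color Removal
--
--     Iteratively remove colors that can be printed without conflicts.
--
--     Time: O(m*n*C), Space: O(C)
--     """
--     if not targetGrid or not targetGrid[0]:
--         return True
--
--     m, n = len(targetGrid), len(targetGrid[0])
--
--     # Get all unique colors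
--     colors = set()
--     for row in targetGrid:
--         colors.update(row)
--
--     def get_bounding_box(color: int) -> Tuple[int, int, int, int]:
--         """Get bounding box for a color"""
--         min_r, max_r = m, -1
--         min_c, max_c = n, -1
--
--         for i in range(m):
--             for j in range(n):
--                 if targetGrid[i][j] == color:
--                     min_r = min(min_r, i)
--                     max_r = max(max_r, i)
--                     min_c = min(min_c, j)
--                     max_c = max(max_c, j)
--
--         return min_r, max_r, min_c, max_c
--
--     def can_print_color(color: int) -> bool:
--         """Check if color can be printed (no other colors in its bounding box)"""
--         min_r, max_r, min_c, max_c = get_bounding_box(color)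
--
--         if min_r > max_r:  # Color not found
--             return True
--
--         for i in range(min_r, max_r + 1):
--             for j in range(min_c, max_c + 1):
--                 if targetGrid[i][j] != color and targetGrid[i][j] != 0:
--                     return False
--
--         return True
--
--     def remove_color(color: int):
--         """Remove color from grid (set to 0)"""
--         for i in range(m):
--             for j in range(n):
--                 if targetGrid[i][j] == color:
--                     targetGrid[i][j] = 0
--
--     # Make a copy to avoid modifying original
--     grid_copy = [row[:] for row in targetGrid]
--     targetGrid = grid_copy
--
--     remaining_colors = colors.copy()
--
--     while remaining_colors:
--         removed_any = False
--
--         for color in list(remaining_colors):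
--             if can_print_color(color):
--                 remove_color(color)
--                 remaining_colors.remove(color)
--                 removed_any = True
--
--         if not removed_any:
--             return False  # Cycle detected
--
--     return True
-- ===== SOURCE B (Python) =====
-- def isPrintable_iterative_removal(targetGrid):
--     """Compute every color's bounding box in one grid pass and its dependency set
--     once; then eliminate colors by a Kahn-style set elimination instead of
--     rescanning and mutating the whole grid for every color in every pass."""
--     if not targetGrid or not targetGrid[0]:
--         return True
--
--     m, n = len(targetGrid), len(targetGrid[0])
--
--     # Bounding boxes of all colors in a single pass over the grid.
--     boxes = {}
--     for i in range(m):
--         row = targetGrid[i]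
--         for j in range(n):
--             c = row[j]
--             if c in boxes:
--                 r0, r1, c0, c1 = boxes[c]
--                 boxes[c] = (min(r0, i), max(r1, i), min(c0, j), max(c1, j))
--             else:
--                 boxes[c] = (i, i, j, j)
--
--     # Dependency sets, computed once from the static bounding boxes.
--     deps = {}
--     for c, (r0, r1, c0, c1) in boxes.items():
--         s = set()
--         for i in range(r0, r1 + 1):
--             s.update(targetGrid[i][c0:c1 + 1])
--         s.discard(c)
--         s.discard(0)
--         deps[c] = s
--
--     # Eliminate colors whose dependencies are already eliminated (topological order).
--     remaining = list(deps)
--     removed = set()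
--     while remaining:
--         still = []
--         for c in remaining:
--             if deps[c] <= removed:
--                 removed.add(c)
--             else:
--                 still.append(c)
--         if len(still) == len(remaining):
--             return False
--         remaining = still
--     return True
-- ===== Notes on version B (the rewrite author's own statement) =====
-- stated objective: faster
-- what changed: B computes every color's bounding box in one grid pass and each color's dependency set once, then runs a Kahn-style set elimination over those sets, instead of A's rescanning the whole grid for every color in every pass of the removal loop and mutating the grid.
import Mathlib
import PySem

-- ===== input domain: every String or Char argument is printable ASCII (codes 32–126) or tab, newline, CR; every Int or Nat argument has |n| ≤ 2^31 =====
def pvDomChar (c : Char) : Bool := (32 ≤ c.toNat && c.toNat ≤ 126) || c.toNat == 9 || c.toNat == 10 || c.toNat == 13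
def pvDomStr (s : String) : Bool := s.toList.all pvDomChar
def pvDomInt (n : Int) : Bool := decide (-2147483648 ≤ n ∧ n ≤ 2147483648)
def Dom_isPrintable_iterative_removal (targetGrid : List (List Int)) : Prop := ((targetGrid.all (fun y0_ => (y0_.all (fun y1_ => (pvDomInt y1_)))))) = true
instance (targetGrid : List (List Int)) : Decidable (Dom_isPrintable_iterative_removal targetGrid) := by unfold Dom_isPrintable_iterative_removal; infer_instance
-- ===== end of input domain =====

-- B computes each color's bounding box in ONE grid pass and its dependency set ONCE, then
-- eliminates colors by set subtraction (Kahn-style), instead of A's rescanning and mutating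
-- the whole grid for every color in every pass.  Return values agree on all of Pre_.

-- ===== PORT A =====

-- targetGrid[i][j] (both programs read cells this way; in range on every input admitted by Pre_)
def pvCell (g : List (List Int)) (i j : Int) : Int := PySem.List.pyGetD (PySem.List.pyGetD g i []) j 0

-- A's get_bounding_box: scan of the whole grid updating (min_r, max_r, min_c, max_c)
def pvBoxA (g : List (List Int)) (m n color : Int) : Int × Int × Int × Int :=
  (PySem.List.pyRange 0 m 1).foldl (fun st i =>
    (PySem.List.pyRange 0 n 1).foldl (fun st j =>
      if pvCell g i j = color then (min st.1 i, max st.2.1 i, min st.2.2.1 j, max st.2.2.2 j) else st) st)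
    (m, -1, n, -1)

-- A's can_print_color
def pvCanPrintA (g : List (List Int)) (m n color : Int) : Bool :=
  let bx := pvBoxA g m n color
  if bx.1 > bx.2.1 then true
  else (PySem.List.pyRange bx.1 (bx.2.1 + 1) 1).all (fun i =>
       (PySem.List.pyRange bx.2.2.1 (bx.2.2.2 + 1) 1).all (fun j =>
         if pvCell g i j ≠ color ∧ pvCell g i j ≠ 0 then false else true))

-- A's remove_color: set every cell (i < m, j < n) equal to color to 0
def pvRemoveA (g : List (List Int)) (n color : Int) : List (List Int) :=
  g.map (fun row => row.mapIdx (fun j v => if (j : Int) < n ∧ v = color then 0 else v))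

-- one 'for color in list(remaining_colors)' pass; state = (grid, remaining, removed_any)
def pvPassA (m n : Int) : List Int → List (List Int) → List Int → Bool → List (List Int) × List Int × Bool
  | [], g, rem, removedAny => (g, rem, removedAny)
  | c :: cs, g, rem, removedAny =>
    if pvCanPrintA g m n c then pvPassA m n cs (pvRemoveA g n c) (rem.erase c) true
    else pvPassA m n cs g rem removedAny

-- A's while loop (fuel is a totality guard only; each executed pass shrinks remaining, so
-- fuel = |colors| + 1 is never exhausted on the runs the claim is about)
def pvLoopA (m n : Int) : Nat → List (List Int) → List Int → Bool
  | 0, _, _ => false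
  | fuel+1, g, rem =>
    if rem.isEmpty then true
    else
      let r := pvPassA m n rem g rem false
      if r.2.2 then pvLoopA m n fuel r.1 r.2.1 else false

def isPrintable_iterative_removal (targetGrid : List (List Int)) : Bool :=
  match targetGrid with
  | [] => true
  | r0 :: _ =>
    if r0.isEmpty then true
    else
      let m : Int := PySem.List.len targetGrid
      let n : Int := PySem.List.len r0
      let colors : PySem.Set Int := targetGrid.foldl (fun s row => PySem.Set.update s row) PySem.Set.empty
      pvLoopA m n (colors.length + 1) targetGrid colors

-- ===== PORT B =====

-- bounding boxes of all colors in one pass over the grid (dict color -> (r0, r1, c0, c1))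
def pvBoxesB (g : List (List Int)) (m n : Int) : PySem.Dict Int (Int × Int × Int × Int) :=
  (PySem.List.pyRange 0 m 1).foldl (fun d i =>
    (PySem.List.pyRange 0 n 1).foldl (fun d j =>
      let c := pvCell g i j
      match d.get? c with
      | some (r0, r1, c0, c1) => d.insert c (min r0 i, max r1 i, min c0 j, max c1 j)
      | none => d.insert c (i, i, j, j)) d) PySem.Dict.empty

-- dependency set of color c from its box: s.update(row slice) per row, then discard c and 0
def pvDepsOfBoxB (g : List (List Int)) (c : Int) (bx : Int × Int × Int × Int) : PySem.Set Int :=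
  let s := (PySem.List.pyRange bx.1 (bx.2.1 + 1) 1).foldl (fun s i =>
      PySem.Set.update s (PySem.List.slice (PySem.List.pyGetD g i []) (some bx.2.2.1) (some (bx.2.2.2 + 1)))) PySem.Set.empty
  PySem.Set.discard (PySem.Set.discard s c) 0

-- one elimination pass: returns (still, removed)
def pvPassB (deps : PySem.Dict Int (PySem.Set Int)) : List Int → PySem.Set Int → List Int × PySem.Set Int
  | [], removed => ([], removed)
  | c :: cs, removed =>
    if PySem.Set.issubset (deps.getD c PySem.Set.empty) removed then pvPassB deps cs (PySem.Set.add removed c)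
    else
      let r := pvPassB deps cs removed
      (c :: r.1, r.2)

-- B's while loop (fuel is the same totality guard as in A's port)
def pvLoopB (deps : PySem.Dict Int (PySem.Set Int)) : Nat → List Int → PySem.Set Int → Bool
  | 0, _, _ => false
  | fuel+1, remaining, removed =>
    if remaining.isEmpty then true
    else
      let r := pvPassB deps remaining removed
      if r.1.length = remaining.length then false
      else pvLoopB deps fuel r.1 r.2

def isPrintable_iterative_removal_alt (targetGrid : List (List Int)) : Bool :=
  match targetGrid with
  | [] => true
  | r0 :: _ =>
    if r0.isEmpty then true
    else
      let m : Int := PySem.List.len targetGrid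
      let n : Int := PySem.List.len r0
      let boxes := pvBoxesB targetGrid m n
      let deps := boxes.items.foldl (fun d p => d.insert p.1 (pvDepsOfBoxB targetGrid p.1 p.2)) PySem.Dict.empty
      pvLoopB deps (deps.keys.length + 1) deps.keys PySem.Set.empty

-- ===== PRECONDITION & SPEC =====

-- Pre_ is exactly A's no-raise domain: A indexes every row at columns 0..len(first row)-1,
-- so it raises IndexError iff some row is shorter than the first row; nothing else is excluded.
def Pre_isPrintable_iterative_removal (targetGrid : List (List Int)) : Prop :=
  ∀ row ∈ targetGrid, (targetGrid.headD []).length ≤ row.length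

instance (targetGrid : List (List Int)) : Decidable (Pre_isPrintable_iterative_removal targetGrid) := by
  unfold Pre_isPrintable_iterative_removal; infer_instance

def pvWitness_isPrintable_iterative_removal : List (List Int) := [[1, 0], [2, 2]]

def Spec_isPrintable_iterative_removal (targetGrid : List (List Int)) (out : Bool) : Prop :=
  out = isPrintable_iterative_removal_alt targetGrid

instance (targetGrid : List (List Int)) (out : Bool) : Decidable (Spec_isPrintable_iterative_removal targetGrid out) := by
  unfold Spec_isPrintable_iterative_removal; infer_instance

-- ===== CLAIM (what is proved, stated in full; the proofs are below) =====
def Claim_equal_isPrintable_iterative_removal : Prop :=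
  ∀ (targetGrid : List (List Int)), Dom_isPrintable_iterative_removal targetGrid →
    Pre_isPrintable_iterative_removal targetGrid →
    Spec_isPrintable_iterative_removal targetGrid (isPrintable_iterative_removal targetGrid)

-- ===== LEMMAS AND PROOFS =====

-- ---- the common mathematical skeleton: cells, matched cells, boxes, dependency sets ----

def pvCells (m n : Int) : List (Int × Int) :=
  (PySem.List.pyRange 0 m 1).flatMap (fun i => (PySem.List.pyRange 0 n 1).map (fun j => (i, j)))

def pvMatched (g : List (List Int)) (m n c : Int) : List (Int × Int) :=
  (pvCells m n).filter (fun p => decide (pvCell g p.1 p.2 = c))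

def pvBox4 (m n : Int) (M : List (Int × Int)) : Int × Int × Int × Int :=
  (M.foldl (fun a p => min a p.1) m, M.foldl (fun a p => max a p.1) (-1),
   M.foldl (fun a p => min a p.2) n, M.foldl (fun a p => max a p.2) (-1))

def pvBoxOf (g : List (List Int)) (m n c : Int) : Int × Int × Int × Int :=
  pvBox4 m n (pvMatched g m n c)

def pvDepsL (g : List (List Int)) (m n c : Int) : List Int :=
  pvDepsOfBoxB g c (pvBoxOf g m n c)

inductive pvGood (g : List (List Int)) (m n : Int) : Int → Prop
  | mk (c : Int) (h : ∀ d ∈ pvDepsL g m n c, pvGood g m n d) : pvGood g m n c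

def pvAllGood (g : List (List Int)) (m n : Int) : Prop :=
  ∀ p ∈ pvCells m n, pvCell g p.1 p.2 ≠ 0 → pvGood g m n (pvCell g p.1 p.2)

def pvMaskF (g : List (List Int)) (n : Int) (rem : List Int) : List (List Int) :=
  g.map (fun row => row.mapIdx (fun j v => if (j : Int) < n ∧ v ∉ rem then 0 else v))

def pvInBox (bx : Int × Int × Int × Int) (p : Int × Int) : Prop :=
  bx.1 ≤ p.1 ∧ p.1 ≤ bx.2.1 ∧ bx.2.2.1 ≤ p.2 ∧ p.2 ≤ bx.2.2.2

-- ---- generic fold lemmas ----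

theorem pv_foldl_flatMap {α β γ : Type} (l : List α) (h : α → List β) (f : γ → β → γ) (init : γ) :
    (l.flatMap h).foldl f init = l.foldl (fun st a => (h a).foldl f st) init := by
  induction l generalizing init with
  | nil => rfl
  | cons a l ih => simp only [List.flatMap_cons, List.foldl_append, List.foldl_cons, ih]

theorem pv_foldl_cells {γ : Type} (m n : Int) (f : γ → Int → Int → γ) (init : γ) :
    (PySem.List.pyRange 0 m 1).foldl (fun st i =>
      (PySem.List.pyRange 0 n 1).foldl (fun st j => f st i j) st) init
      = (pvCells m n).foldl (fun st p => f st p.1 p.2) init := by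
  unfold pvCells
  rw [pv_foldl_flatMap]
  simp only [List.foldl_map]

theorem pv_foldl4_split (M : List (Int × Int)) (a b c d : Int) :
    M.foldl (fun st p => (min st.1 p.1, max st.2.1 p.1, min st.2.2.1 p.2, max st.2.2.2 p.2)) (a, b, c, d)
      = (M.foldl (fun x p => min x p.1) a, M.foldl (fun x p => max x p.1) b,
         M.foldl (fun x p => min x p.2) c, M.foldl (fun x p => max x p.2) d) := by
  induction M generalizing a b c d with
  | nil => rfl
  | cons p M ih => simp only [List.foldl_cons, ih]

theorem pv_foldl_min_le {α : Type} (l : List α) (k : α → Int) (a : Int) {x : α} (hx : x ∈ l) :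
    l.foldl (fun s y => min s (k y)) a ≤ k x := by
  induction l generalizing a with
  | nil => cases hx
  | cons y l ih =>
    simp only [List.foldl_cons]
    rcases List.mem_cons.mp hx with h | h
    · subst h
      have h2 : ∀ (l' : List α) (a' : Int), l'.foldl (fun s y => min s (k y)) a' ≤ a' := by
        intro l'
        induction l' with
        | nil => intro a'; simp
        | cons z l' ih2 => intro a'; simp only [List.foldl_cons]
                           exact le_trans (ih2 _) (min_le_left _ _)
      exact le_trans (h2 l _) (min_le_right _ _)
    · exact ih _ h

theorem pv_le_foldl_max {α : Type} (l : List α) (k : α → Int) (a : Int) {x : α} (hx : x ∈ l) :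
    k x ≤ l.foldl (fun s y => max s (k y)) a := by
  induction l generalizing a with
  | nil => cases hx
  | cons y l ih =>
    simp only [List.foldl_cons]
    rcases List.mem_cons.mp hx with h | h
    · subst h
      have h2 : ∀ (l' : List α) (a' : Int), a' ≤ l'.foldl (fun s y => max s (k y)) a' := by
        intro l'
        induction l' with
        | nil => intro a'; simp
        | cons z l' ih2 => intro a'; simp only [List.foldl_cons]
                           exact le_trans (le_max_left _ _) (ih2 _)
      exact le_trans (le_max_right _ _) (h2 l _)
    · exact ih _ h

theorem pv_le_foldl_min {α : Type} (l : List α) (k : α → Int) (a lo : Int)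
    (ha : lo ≤ a) (hl : ∀ x ∈ l, lo ≤ k x) : lo ≤ l.foldl (fun s y => min s (k y)) a := by
  induction l generalizing a with
  | nil => simpa using ha
  | cons y l ih =>
    simp only [List.foldl_cons]
    exact ih _ (le_min ha (hl y (List.mem_cons_self))) (fun x hx => hl x (List.mem_cons_of_mem _ hx))

theorem pv_foldl_max_le {α : Type} (l : List α) (k : α → Int) (a hi : Int)
    (ha : a ≤ hi) (hl : ∀ x ∈ l, k x ≤ hi) : l.foldl (fun s y => max s (k y)) a ≤ hi := by
  induction l generalizing a with
  | nil => simpa using ha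
  | cons y l ih =>
    simp only [List.foldl_cons]
    exact ih _ (max_le ha (hl y (List.mem_cons_self))) (fun x hx => hl x (List.mem_cons_of_mem _ hx))

theorem pv_mem_foldl_update {α : Type} (l : List α) (f : α → List Int) (s : PySem.Set Int) (y : Int) :
    y ∈ l.foldl (fun s x => PySem.Set.update s (f x)) s ↔ y ∈ s ∨ ∃ x ∈ l, y ∈ f x := by
  induction l generalizing s with
  | nil => simp
  | cons x l ih =>
    simp only [List.foldl_cons, ih, PySem.Set.mem_update, List.mem_cons]
    constructor
    · rintro ((h | h) | ⟨z, hz, hy⟩)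
      · exact Or.inl h
      · exact Or.inr ⟨x, Or.inl rfl, h⟩
      · exact Or.inr ⟨z, Or.inr hz, hy⟩
    · rintro (h | ⟨z, (rfl | hz), hy⟩)
      · exact Or.inl (Or.inl h)
      · exact Or.inl (Or.inr hy)
      · exact Or.inr ⟨z, hz, hy⟩

-- ---- cells and matched ----

theorem pv_mem_cells {m n : Int} {p : Int × Int} :
    p ∈ pvCells m n ↔ 0 ≤ p.1 ∧ p.1 < m ∧ 0 ≤ p.2 ∧ p.2 < n := by
  obtain ⟨i, j⟩ := p
  unfold pvCells
  simp only [List.mem_flatMap, List.mem_map, PySem.List.mem_pyRange_one, Prod.mk.injEq]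
  constructor
  · rintro ⟨a, ⟨h1, h2⟩, b, ⟨h3, h4⟩, rfl, rfl⟩
    exact ⟨h1, h2, h3, h4⟩
  · rintro ⟨h1, h2, h3, h4⟩
    exact ⟨i, ⟨h1, h2⟩, j, ⟨h3, h4⟩, rfl, rfl⟩

theorem pv_mem_matched {g : List (List Int)} {m n c : Int} {p : Int × Int} :
    p ∈ pvMatched g m n c ↔ p ∈ pvCells m n ∧ pvCell g p.1 p.2 = c := by
  unfold pvMatched
  simp [List.mem_filter]

-- ---- box characterisation ----

theorem pvBoxA_eq (g : List (List Int)) (m n c : Int) : pvBoxA g m n c = pvBoxOf g m n c := by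
  unfold pvBoxA
  rw [pv_foldl_cells]
  have h : ((pvCells m n).foldl (fun st p =>
      if pvCell g p.1 p.2 = c then (min st.1 p.1, max st.2.1 p.1, min st.2.2.1 p.2, max st.2.2.2 p.2) else st)
      ((m : Int), (-1 : Int), (n : Int), (-1 : Int)))
      = (pvMatched g m n c).foldl (fun st p =>
          (min st.1 p.1, max st.2.1 p.1, min st.2.2.1 p.2, max st.2.2.2 p.2))
          ((m : Int), (-1 : Int), (n : Int), (-1 : Int)) := by
    unfold pvMatched
    rw [List.foldl_filter]
    simp
  rw [h]
  unfold pvBoxOf pvBox4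
  rw [pv_foldl4_split]

theorem pvBox4_mem_bounds {m n : Int} {M : List (Int × Int)} {p : Int × Int} (hp : p ∈ M) :
    pvInBox (pvBox4 m n M) p := by
  unfold pvInBox pvBox4
  exact ⟨pv_foldl_min_le M (fun p => p.1) m hp, pv_le_foldl_max M (fun p => p.1) (-1) hp,
         pv_foldl_min_le M (fun p => p.2) n hp, pv_le_foldl_max M (fun p => p.2) (-1) hp⟩

theorem pvBox4_range {m n : Int} {M : List (Int × Int)} (hM : M ≠ [])
    (hbnd : ∀ p ∈ M, 0 ≤ p.1 ∧ p.1 < m ∧ 0 ≤ p.2 ∧ p.2 < n) (h0m : 0 ≤ m) (h0n : 0 ≤ n) :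
    0 ≤ (pvBox4 m n M).1 ∧ (pvBox4 m n M).2.1 < m ∧ 0 ≤ (pvBox4 m n M).2.2.1 ∧ (pvBox4 m n M).2.2.2 < n := by
  refine ⟨pv_le_foldl_min M (fun p => p.1) m 0 h0m (fun p hp => (hbnd p hp).1), ?_,
          pv_le_foldl_min M (fun p => p.2) n 0 h0n (fun p hp => (hbnd p hp).2.2.1), ?_⟩
  · have h : (pvBox4 m n M).2.1 ≤ m - 1 :=
      pv_foldl_max_le M (fun p => p.1) (-1) (m - 1) (by omega)
        (fun p hp => by show p.1 ≤ m - 1; have := (hbnd p hp).2.1; omega)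
    omega
  · have h : (pvBox4 m n M).2.2.2 ≤ n - 1 :=
      pv_foldl_max_le M (fun p => p.2) (-1) (n - 1) (by omega)
        (fun p hp => by show p.2 ≤ n - 1; have := (hbnd p hp).2.2.2; omega)
    omega

theorem pvBoxOf_empty_iff {g : List (List Int)} {m n c : Int} (h0m : 0 ≤ m) :
    (pvBoxOf g m n c).1 > (pvBoxOf g m n c).2.1 ↔ pvMatched g m n c = [] := by
  constructor
  · intro h
    by_contra hne
    obtain ⟨p, hp⟩ := List.exists_mem_of_ne_nil _ hne
    have := pvBox4_mem_bounds (m := m) (n := n) hp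
    unfold pvBoxOf at h
    unfold pvInBox at this
    omega
  · intro h
    unfold pvBoxOf pvBox4
    rw [h]
    simp only [List.foldl_nil]
    omega

theorem pvBoxOf_inBox_mem_cells {g : List (List Int)} {m n c : Int} {p : Int × Int}
    (hM : pvMatched g m n c ≠ []) (h0m : 0 ≤ m) (h0n : 0 ≤ n)
    (hp : pvInBox (pvBoxOf g m n c) p) : p ∈ pvCells m n := by
  have hbnd : ∀ q ∈ pvMatched g m n c, 0 ≤ q.1 ∧ q.1 < m ∧ 0 ≤ q.2 ∧ q.2 < n := by
    intro q hq
    exact pv_mem_cells.mp (pv_mem_matched.mp hq).1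
  have hr := pvBox4_range hM hbnd h0m h0n
  unfold pvBoxOf at hp
  unfold pvInBox at hp
  rw [pv_mem_cells]
  unfold pvBoxOf at hr
  omega

-- ---- cell access under Pre_ ----

theorem pvCell_nat (g : List (List Int)) (i j : Nat) (hi : i < g.length)
    (hj : j < (g[i]'hi).length) :
    pvCell g (i : Int) (j : Int) = (g[i]'hi)[j]'hj := by
  unfold pvCell
  rw [PySem.List.pyGetD_eq_getElem g ([] : List Int) (by omega) (by exact_mod_cast hi)]
  simp only [Int.toNat_natCast]
  rw [PySem.List.pyGetD_eq_getElem (g[i]'hi) (0 : Int) (by omega) (by exact_mod_cast hj)]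
  simp only [Int.toNat_natCast]

theorem pvCell_int (g : List (List Int)) {i j : Int} {a b : Nat}
    (ha : i = (a : Int)) (hb : j = (b : Int)) (hi : a < g.length) (hj : b < (g[a]'hi).length) :
    pvCell g i j = (g[a]'hi)[b]'hj := by
  subst ha
  subst hb
  exact pvCell_nat g a b hi hj

theorem pvCell_eq {g : List (List Int)} {m n : Int} (hm : m = (g.length : Int))
    (hn : ∀ row ∈ g, n ≤ (row.length : Int)) {p : Int × Int} (hp : p ∈ pvCells m n) :
    ∃ (hi : p.1.toNat < g.length) (hj : p.2.toNat < (g[p.1.toNat]'hi).length),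
      pvCell g p.1 p.2 = (g[p.1.toNat]'hi)[p.2.toNat]'hj := by
  obtain ⟨h0i, him, h0j, hjn⟩ := pv_mem_cells.mp hp
  have hi : p.1.toNat < g.length := by omega
  have hrow : n ≤ ((g[p.1.toNat]'hi).length : Int) := hn _ (List.getElem_mem hi)
  have hj : p.2.toNat < (g[p.1.toNat]'hi).length := by omega
  exact ⟨hi, hj, pvCell_int g (by omega) (by omega) hi hj⟩

theorem pvCell_visible {g : List (List Int)} {m n : Int} (hm : m = (g.length : Int))
    (hn : ∀ row ∈ g, n ≤ (row.length : Int)) {p : Int × Int} (hp : p ∈ pvCells m n) :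
    ∃ row ∈ g, pvCell g p.1 p.2 ∈ row := by
  obtain ⟨hi, hj, hc⟩ := pvCell_eq hm hn hp
  exact ⟨g[p.1.toNat], List.getElem_mem hi, hc ▸ List.getElem_mem hj⟩

-- ---- dependency set membership ----

theorem pv_mem_slice {row : List Int} {c0 c1 d : Int} (h0 : 0 ≤ c0) (h0' : 0 ≤ c1)
    (h1 : c1 + 1 ≤ (row.length : Int)) :
    d ∈ PySem.List.slice row (some c0) (some (c1 + 1)) ↔
      ∃ j : Int, c0 ≤ j ∧ j ≤ c1 ∧ PySem.List.pyGetD row j 0 = d := by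
  rw [PySem.List.slice_toNat (b := c1 + 1) row h0 (by omega)]
  constructor
  · intro hd
    obtain ⟨t, ht, hval⟩ := List.mem_iff_getElem.mp hd
    have htl : t < (c1 + 1).toNat - c0.toNat ∧ c0.toNat + t < row.length := by
      simp only [List.length_take, List.length_drop, lt_min_iff] at ht
      omega
    refine ⟨c0 + t, by omega, by omega, ?_⟩
    rw [PySem.List.pyGetD_eq_getElem row (0 : Int) (by omega) (by omega)]
    rw [List.getElem_take, List.getElem_drop] at hval
    rw [← hval]
    congr 1
    omega
  · rintro ⟨j, hj0, hj1, hval⟩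
    have hjr : j.toNat < row.length := by omega
    rw [PySem.List.pyGetD_eq_getElem row (0 : Int) (by omega) (by omega)] at hval
    rw [List.mem_iff_getElem]
    refine ⟨(j - c0).toNat, ?_, ?_⟩
    · simp only [List.length_take, List.length_drop, lt_min_iff]
      omega
    · rw [List.getElem_take, List.getElem_drop]
      rw [← hval]
      congr 1
      omega

theorem pv_mem_depsL {g : List (List Int)} {m n c d : Int} (hm : m = (g.length : Int))
    (hn : ∀ row ∈ g, n ≤ (row.length : Int)) (h0m : 0 ≤ m) (h0n : 0 ≤ n) :
    d ∈ pvDepsL g m n c ↔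
      d ≠ 0 ∧ d ≠ c ∧ ∃ p ∈ pvCells m n, pvInBox (pvBoxOf g m n c) p ∧ pvCell g p.1 p.2 = d := by
  unfold pvDepsL pvDepsOfBoxB
  simp only [PySem.Set.mem_discard]
  rw [pv_mem_foldl_update]
  constructor
  · rintro ⟨⟨hin, hdc⟩, hd0⟩
    rcases hin with hin | ⟨i, hi, hd⟩
    · cases hin
    · rw [PySem.List.mem_pyRange_one] at hi
      have hMne : pvMatched g m n c ≠ [] := by
        intro hM
        have := (pvBoxOf_empty_iff (g := g) (m := m) (n := n) (c := c) h0m).mpr hM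
        omega
      have hbnd : ∀ q ∈ pvMatched g m n c, 0 ≤ q.1 ∧ q.1 < m ∧ 0 ≤ q.2 ∧ q.2 < n :=
        fun q hq => pv_mem_cells.mp (pv_mem_matched.mp hq).1
      have hr : 0 ≤ (pvBoxOf g m n c).1 ∧ (pvBoxOf g m n c).2.1 < m ∧
          0 ≤ (pvBoxOf g m n c).2.2.1 ∧ (pvBoxOf g m n c).2.2.2 < n :=
        pvBox4_range hMne hbnd h0m h0n
      obtain ⟨q, hq⟩ := List.exists_mem_of_ne_nil _ hMne
      have hqb : pvInBox (pvBoxOf g m n c) q := pvBox4_mem_bounds hq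
      obtain ⟨hq1, hq2, hq3, hq4⟩ := hqb
      have hqc := pv_mem_cells.mp (pv_mem_matched.mp hq).1
      have hil : i.toNat < g.length := by omega
      have hrowlen : n ≤ ((g[i.toNat]'hil).length : Int) := hn _ (List.getElem_mem hil)
      have hrowe : PySem.List.pyGetD g i [] = g[i.toNat]'hil :=
        PySem.List.pyGetD_eq_getElem g ([] : List Int) (by omega) (by omega)
      rw [hrowe] at hd
      rw [pv_mem_slice (by omega) (by omega) (by omega)] at hd
      obtain ⟨j, hj0, hj1, hval⟩ := hd
      have hcm : (i, j) ∈ pvCells m n := by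
        rw [pv_mem_cells]
        refine ⟨by omega, by omega, by omega, by omega⟩
      refine ⟨hd0, hdc, (i, j), hcm, ⟨by omega, by omega, by omega, by omega⟩, ?_⟩
      show pvCell g i j = d
      unfold pvCell
      rw [hrowe]
      exact hval
  · rintro ⟨hd0, hdc, p, hp, hib, hval⟩
    obtain ⟨hp1, hp2, hp3, hp4⟩ := pv_mem_cells.mp hp
    obtain ⟨hb1, hb2, hb3, hb4⟩ := hib
    have hMne : pvMatched g m n c ≠ [] := by
      intro hM
      have := (pvBoxOf_empty_iff (g := g) (m := m) (n := n) (c := c) h0m).mpr hM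
      omega
    have hbnd : ∀ q ∈ pvMatched g m n c, 0 ≤ q.1 ∧ q.1 < m ∧ 0 ≤ q.2 ∧ q.2 < n :=
      fun q hq => pv_mem_cells.mp (pv_mem_matched.mp hq).1
    have hr : 0 ≤ (pvBoxOf g m n c).1 ∧ (pvBoxOf g m n c).2.1 < m ∧
        0 ≤ (pvBoxOf g m n c).2.2.1 ∧ (pvBoxOf g m n c).2.2.2 < n :=
      pvBox4_range hMne hbnd h0m h0n
    refine ⟨⟨Or.inr ⟨p.1, ?_, ?_⟩, hdc⟩, hd0⟩
    · rw [PySem.List.mem_pyRange_one]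
      omega
    · have hil : p.1.toNat < g.length := by omega
      have hrowlen : n ≤ ((g[p.1.toNat]'hil).length : Int) := hn _ (List.getElem_mem hil)
      have hrowe : PySem.List.pyGetD g p.1 [] = g[p.1.toNat]'hil :=
        PySem.List.pyGetD_eq_getElem g ([] : List Int) (by omega) (by omega)
      rw [hrowe]
      rw [pv_mem_slice (by omega) (by omega) (by omega)]
      refine ⟨p.2, by omega, by omega, ?_⟩
      rw [← hval]
      show PySem.List.pyGetD (g[p.1.toNat]'hil) p.2 0 = pvCell g p.1 p.2
      unfold pvCell
      rw [hrowe]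

theorem pv_depsL_ne {g : List (List Int)} {m n c d : Int} (hd : d ∈ pvDepsL g m n c) :
    d ≠ c ∧ d ≠ 0 := by
  unfold pvDepsL pvDepsOfBoxB at hd
  simp only [PySem.Set.mem_discard] at hd
  exact ⟨hd.1.2, hd.2⟩

-- ---- mask lemmas ----

theorem pvCell_mask {g : List (List Int)} {m n : Int} (hm : m = (g.length : Int))
    (hn : ∀ row ∈ g, n ≤ (row.length : Int)) (rem : List Int) {i j : Int} (hp : (i, j) ∈ pvCells m n) :
    pvCell (pvMaskF g n rem) i j = if pvCell g i j ∈ rem then pvCell g i j else 0 := by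
  obtain ⟨h0i', him', h0j', hjn'⟩ := pv_mem_cells.mp hp
  have h0i : 0 ≤ i := h0i'
  have him : i < m := him'
  have h0j : 0 ≤ j := h0j'
  have hjn : j < n := hjn'
  have hi : i.toNat < g.length := by omega
  have hrow : n ≤ ((g[i.toNat]'hi).length : Int) := hn _ (List.getElem_mem hi)
  have hj : j.toNat < (g[i.toNat]'hi).length := by omega
  have hmaski : i.toNat < (pvMaskF g n rem).length := by
    simpa [pvMaskF] using hi
  have hmaskj : j.toNat < ((pvMaskF g n rem)[i.toNat]'hmaski).length := by
    simp only [pvMaskF, List.getElem_map, List.length_mapIdx]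
    exact hj
  have hL := pvCell_int (pvMaskF g n rem) (i := i) (j := j) (by omega) (by omega) hmaski hmaskj
  have hR := pvCell_int g (i := i) (j := j) (by omega) (by omega) hi hj
  rw [hL, hR]
  simp only [pvMaskF, List.getElem_map, List.getElem_mapIdx]
  have hjj : ((j.toNat : Nat) : Int) = j := by omega
  rw [hjj]
  by_cases hv : (g[i.toNat]'hi)[j.toNat]'hj ∈ rem
  · simp [hv]
  · simp [hv, hjn]

theorem pvMatched_mask {g : List (List Int)} {m n c : Int} (hm : m = (g.length : Int))
    (hn : ∀ row ∈ g, n ≤ (row.length : Int)) {rem : List Int} (hc0 : c ≠ 0) (hcr : c ∈ rem) :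
    pvMatched (pvMaskF g n rem) m n c = pvMatched g m n c := by
  unfold pvMatched
  apply List.filter_congr
  intro p hp
  have hmk : ((p.1, p.2) : Int × Int) ∈ pvCells m n := hp
  rw [pvCell_mask hm hn rem hmk]
  by_cases hv : pvCell g p.1 p.2 ∈ rem
  · rw [if_pos hv]
  · rw [if_neg hv]
    have h1 : ¬ ((0 : Int) = c) := fun h => hc0 h.symm
    have h2 : ¬ (pvCell g p.1 p.2 = c) := fun h => hv (h ▸ hcr)
    simp [h1, h2]

theorem pvRemoveA_mask {g : List (List Int)} {n c : Int} {rem : List Int} (hnd : rem.Nodup) :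
    pvRemoveA (pvMaskF g n rem) n c = pvMaskF g n (rem.erase c) := by
  unfold pvRemoveA pvMaskF
  rw [List.map_map]
  apply List.map_congr_left
  intro row _
  show (row.mapIdx fun j v => if (j : Int) < n ∧ v ∉ rem then 0 else v).mapIdx
      (fun j v => if (j : Int) < n ∧ v = c then 0 else v)
    = row.mapIdx fun j v => if (j : Int) < n ∧ v ∉ rem.erase c then 0 else v
  apply List.ext_getElem
  · simp
  · intro k h1 h2
    simp only [List.getElem_mapIdx]
    by_cases hk : (k : Int) < n
    · have h2' : k < row.length := by simpa using h2
      by_cases hv : row[k]'h2' ∈ rem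
      · have hinner : (if (k : Int) < n ∧ row[k]'h2' ∉ rem then (0 : Int) else row[k]'h2')
            = row[k]'h2' := by
          rw [if_neg]
          simp [hv]
        rw [hinner]
        by_cases hvc : row[k]'h2' = c
        · have hne : row[k]'h2' ∉ rem.erase c := by
            rw [hnd.mem_erase_iff]
            intro hcontra
            exact hcontra.1 hvc
          rw [if_pos ⟨hk, hvc⟩, if_pos ⟨hk, hne⟩]
        · have hmem : row[k]'h2' ∈ rem.erase c := by
            rw [hnd.mem_erase_iff]
            exact ⟨hvc, hv⟩
          rw [if_neg (fun hco => hvc hco.2), if_neg (fun hco => hco.2 hmem)]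
      · have hne : row[k]'h2' ∉ rem.erase c := fun hcontra => hv (hnd.mem_erase_iff.mp hcontra).2
        have hinner : (if (k : Int) < n ∧ row[k]'h2' ∉ rem then (0 : Int) else row[k]'h2')
            = 0 := if_pos ⟨hk, hv⟩
        rw [hinner]
        conv_rhs => rw [if_pos ⟨hk, hne⟩]
        split <;> rfl
    · rw [if_neg (fun hco => hk hco.1), if_neg (fun hco => hk hco.1), if_neg (fun hco => hk hco.1)]

theorem pvMaskF_init {g : List (List Int)} {m n : Int} (hm : m = (g.length : Int))
    (hn : ∀ row ∈ g, n ≤ (row.length : Int)) {rem : List Int}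
    (h : ∀ p ∈ pvCells m n, pvCell g p.1 p.2 ∈ rem) : pvMaskF g n rem = g := by
  unfold pvMaskF
  apply List.ext_getElem
  · simp
  · intro i h1 h2
    simp only [List.getElem_map]
    apply List.ext_getElem
    · simp
    · intro j h3 h4
      simp only [List.getElem_mapIdx]
      by_cases hj : (j : Int) < n
      · have hp : (((i : Nat) : Int), ((j : Nat) : Int)) ∈ pvCells m n := by
          rw [pv_mem_cells]
          refine ⟨by omega, by omega, by omega, by omega⟩
        have hv : pvCell g ((i : Nat) : Int) ((j : Nat) : Int) ∈ rem := h _ hp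
        have hcell : pvCell g ((i : Nat) : Int) ((j : Nat) : Int) = (g[i]'h2)[j]'h4 :=
          pvCell_nat g i j h2 h4
        rw [hcell] at hv
        simp [hv]
      · simp [hj]

-- ghosts (colours with no visible cell) have an empty dependency list, hence are Good
theorem pv_depsL_of_unmatched {g : List (List Int)} {m n c : Int} (h0m : 0 ≤ m)
    (hM : pvMatched g m n c = []) : pvDepsL g m n c = [] := by
  unfold pvDepsL pvDepsOfBoxB
  have hb : pvBoxOf g m n c = (m, -1, n, -1) := by
    unfold pvBoxOf pvBox4
    rw [hM]
    rfl
  rw [hb]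
  have h1 : PySem.List.pyRange m ((-1 : Int) + 1) 1 = [] := by
    rw [PySem.List.pyRange_one_eq_nil]
    omega
  show PySem.Set.discard (PySem.Set.discard
    ((PySem.List.pyRange m ((-1 : Int) + 1) 1).foldl _ PySem.Set.empty) c) 0 = []
  rw [h1]
  rfl

theorem pvGood_of_unmatched {g : List (List Int)} {m n c : Int} (h0m : 0 ≤ m)
    (hM : pvMatched g m n c = []) : pvGood g m n c := by
  constructor
  rw [pv_depsL_of_unmatched h0m hM]
  intro d hd
  cases hd

-- ---- can_print characterisation ----

theorem pvCanPrintA_char {g : List (List Int)} {m n c : Int} (hm : m = (g.length : Int))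
    (hn : ∀ row ∈ g, n ≤ (row.length : Int)) (h0m : 0 ≤ m) (h0n : 0 ≤ n)
    {rem : List Int} (hc0 : c ≠ 0) (hcr : c ∈ rem) :
    pvCanPrintA (pvMaskF g n rem) m n c = true ↔ ∀ d ∈ pvDepsL g m n c, d ∉ rem := by
  have hbox : pvBoxA (pvMaskF g n rem) m n c = pvBoxOf g m n c := by
    rw [pvBoxA_eq]
    unfold pvBoxOf
    rw [pvMatched_mask hm hn hc0 hcr]
  by_cases hM : pvMatched g m n c = []
  · have hgt : (pvBoxOf g m n c).1 > (pvBoxOf g m n c).2.1 := (pvBoxOf_empty_iff h0m).mpr hM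
    simp only [pvCanPrintA]
    rw [hbox, if_pos hgt]
    constructor
    · intro _ d hd
      rw [pv_depsL_of_unmatched h0m hM] at hd
      cases hd
    · intro _
      rfl
  · have hle : ¬ ((pvBoxOf g m n c).1 > (pvBoxOf g m n c).2.1) := by
      rw [pvBoxOf_empty_iff h0m]
      exact hM
    simp only [pvCanPrintA]
    rw [hbox, if_neg hle]
    rw [List.all_eq_true]
    constructor
    · intro h d hd hdr
      rw [pv_mem_depsL hm hn h0m h0n] at hd
      obtain ⟨hd0, hdc, p, hp, ⟨hb1, hb2, hb3, hb4⟩, hval⟩ := hd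
      have h1 := h p.1 (by rw [PySem.List.mem_pyRange_one]; omega)
      rw [List.all_eq_true] at h1
      have h2 := h1 p.2 (by rw [PySem.List.mem_pyRange_one]; omega)
      rw [show pvCell (pvMaskF g n rem) p.1 p.2
            = if pvCell g p.1 p.2 ∈ rem then pvCell g p.1 p.2 else 0
          from pvCell_mask hm hn rem hp] at h2
      rw [hval, if_pos hdr] at h2
      split_ifs at h2 with hcond
      exact hcond ⟨hdc, hd0⟩
    · intro h i hi
      rw [List.all_eq_true]
      intro j hj
      rw [PySem.List.mem_pyRange_one] at hi hj
      have hp : (i, j) ∈ pvCells m n :=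
        pvBoxOf_inBox_mem_cells hM h0m h0n ⟨hi.1, by omega, hj.1, by omega⟩
      rw [pvCell_mask hm hn rem hp]
      by_cases hv : pvCell g i j ∈ rem
      · rw [if_pos hv]
        by_cases hcond : pvCell g i j ≠ c ∧ pvCell g i j ≠ 0
        · exfalso
          have hdep : pvCell g i j ∈ pvDepsL g m n c := by
            rw [pv_mem_depsL hm hn h0m h0n]
            exact ⟨hcond.2, hcond.1, (i, j), hp, ⟨hi.1, by omega, hj.1, by omega⟩, rfl⟩
          exact h _ hdep hv
        · rw [if_neg hcond]
      · rw [if_neg hv]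
        have hz : ¬ ((0 : Int) ≠ c ∧ (0 : Int) ≠ 0) := by simp
        rw [if_neg hz]

theorem pvCanPrintA_allzero {G : List (List Int)} {m n : Int} (h0m : 0 ≤ m) (h0n : 0 ≤ n)
    (h : ∀ p ∈ pvCells m n, pvCell G p.1 p.2 = 0) : pvCanPrintA G m n 0 = true := by
  simp only [pvCanPrintA]
  rw [pvBoxA_eq]
  by_cases hM : pvMatched G m n 0 = []
  · rw [if_pos ((pvBoxOf_empty_iff h0m).mpr hM)]
  · rw [if_neg (by rw [pvBoxOf_empty_iff h0m]; exact hM)]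
    rw [List.all_eq_true]
    intro i hi
    rw [List.all_eq_true]
    intro j hj
    rw [PySem.List.mem_pyRange_one] at hi hj
    have hp : (i, j) ∈ pvCells m n :=
      pvBoxOf_inBox_mem_cells hM h0m h0n ⟨hi.1, by omega, hj.1, by omega⟩
    rw [show pvCell G i j = 0 from h (i, j) hp]
    simp

-- ---- the minimal-element lemma for Good colors ----

theorem pvGood_minimal {g : List (List Int)} {m n c : Int} (hg : pvGood g m n c) :
    ∀ rem : List Int, c ∈ rem → c ≠ 0 →
      ∃ c', c' ∈ rem ∧ c' ≠ 0 ∧ ∀ d ∈ pvDepsL g m n c', d ∉ rem := by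
  induction hg with
  | mk c h ih =>
    intro rem hc hc0
    by_cases hall : ∀ d ∈ pvDepsL g m n c, d ∉ rem
    · exact ⟨c, hc, hc0, hall⟩
    · push Not at hall
      obtain ⟨d, hd, hdr⟩ := hall
      exact ih d hd rem hdr (pv_depsL_ne hd).2

-- ---- A-side pass lemmas ----

theorem pvPassA_flag_mono (m n : Int) (cs : List Int) (g : List (List Int)) (rem : List Int) :
    (pvPassA m n cs g rem true).2.2 = true := by
  induction cs generalizing g rem with
  | nil => rfl
  | cons c cs ih =>
    unfold pvPassA
    split
    · exact ih _ _
    · exact ih _ _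

theorem pvPassA_flag_of (m n : Int) (cs : List Int) (g : List (List Int)) (rem : List Int) (b : Bool)
    (h : ∃ c ∈ cs, pvCanPrintA g m n c = true) : (pvPassA m n cs g rem b).2.2 = true := by
  induction cs generalizing g rem b with
  | nil => obtain ⟨c, hc, _⟩ := h; cases hc
  | cons c cs ih =>
    unfold pvPassA
    obtain ⟨c', hc', hcp⟩ := h
    rcases List.mem_cons.mp hc' with rfl | hc'
    · rw [hcp]
      simp only [if_true]
      exact pvPassA_flag_mono m n cs _ _
    · split
      · exact pvPassA_flag_mono m n cs _ _
      · exact ih _ _ _ ⟨c', hc', hcp⟩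

theorem pvPassA_sublist (m n : Int) (cs : List Int) (g : List (List Int)) (rem : List Int) (b : Bool) :
    (pvPassA m n cs g rem b).2.1.Sublist rem := by
  induction cs generalizing g rem b with
  | nil => exact List.Sublist.refl rem
  | cons c cs ih =>
    unfold pvPassA
    split
    · exact (ih _ _ _).trans (List.erase_sublist)
    · exact ih _ _ _

theorem pvPassA_len_lt (m n : Int) (cs : List Int) (g : List (List Int)) (rem : List Int)
    (hsub : ∀ c ∈ cs, c ∈ rem) (hflag : (pvPassA m n cs g rem false).2.2 = true) :
    (pvPassA m n cs g rem false).2.1.length < rem.length := by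
  induction cs generalizing g rem with
  | nil => simp [pvPassA] at hflag
  | cons c cs ih =>
    unfold pvPassA at hflag ⊢
    by_cases hcp : pvCanPrintA g m n c = true
    · rw [if_pos hcp] at hflag ⊢
      have hsl := pvPassA_sublist m n cs (pvRemoveA g n c) (rem.erase c) true
      have h1 := hsl.length_le
      have h2 : (rem.erase c).length = rem.length - 1 :=
        List.length_erase_of_mem (hsub c List.mem_cons_self)
      have h3 : 1 ≤ rem.length := List.length_pos_of_mem (hsub c List.mem_cons_self)
      omega
    · rw [if_neg hcp] at hflag ⊢
      exact ih _ _ (fun x hx => hsub x (List.mem_cons_of_mem _ hx)) hflag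

theorem pvPassA_mask {g : List (List Int)} (m n : Int) (cs : List Int) (rem : List Int) (b : Bool)
    (hnd : rem.Nodup) :
    (pvPassA m n cs (pvMaskF g n rem) rem b).1 = pvMaskF g n (pvPassA m n cs (pvMaskF g n rem) rem b).2.1 := by
  induction cs generalizing rem b with
  | nil => rfl
  | cons c cs ih =>
    unfold pvPassA
    by_cases hcp : pvCanPrintA (pvMaskF g n rem) m n c = true
    · rw [if_pos hcp, pvRemoveA_mask hnd]
      exact ih (rem.erase c) true (hnd.erase c)
    · rw [if_neg hcp]
      exact ih rem b hnd

-- invariant for the 'A returns False' direction: every visible nonzero colour already removed is Good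
def pvInvA (g : List (List Int)) (m n : Int) (rem : List Int) : Prop :=
  ∀ p ∈ pvCells m n, pvCell g p.1 p.2 ≠ 0 → pvCell g p.1 p.2 ∉ rem → pvGood g m n (pvCell g p.1 p.2)

theorem pvPassA_inv {g : List (List Int)} {m n c0 : Int} (hm : m = (g.length : Int))
    (hn : ∀ row ∈ g, n ≤ (row.length : Int)) (h0m : 0 ≤ m) (h0n : 0 ≤ n)
    (hc0 : c0 ≠ 0) (hbad : ¬ pvGood g m n c0) :
    ∀ (cs rem : List Int) (b : Bool), rem.Nodup → cs.Nodup → (∀ c ∈ cs, c ∈ rem) →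
      pvInvA g m n rem → c0 ∈ rem →
      pvInvA g m n (pvPassA m n cs (pvMaskF g n rem) rem b).2.1 ∧
        c0 ∈ (pvPassA m n cs (pvMaskF g n rem) rem b).2.1 := by
  intro cs
  induction cs with
  | nil => intro rem b hndr hndc hsubs hInv hc0m; exact ⟨hInv, hc0m⟩
  | cons c cs ih =>
    intro rem b hndr hndc hsubs hInv hc0m
    unfold pvPassA
    by_cases hcp : pvCanPrintA (pvMaskF g n rem) m n c = true
    · rw [if_pos hcp]
      have hcrem : c ∈ rem := hsubs c List.mem_cons_self
      have hgood_of : c ≠ 0 → pvGood g m n c := by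
        intro hcz
        have hdeps := (pvCanPrintA_char hm hn h0m h0n hcz hcrem).mp hcp
        constructor
        intro d hd
        have hd' := hd
        rw [pv_mem_depsL hm hn h0m h0n] at hd'
        obtain ⟨hd0, hdc, p, hp, _, hval⟩ := hd'
        have hG := hInv p hp (by rw [hval]; exact hd0) (by rw [hval]; exact hdeps d hd)
        rw [hval] at hG
        exact hG
      have hcc0 : c ≠ c0 := by
        rintro rfl
        exact hbad (hgood_of hc0)
      rw [pvRemoveA_mask hndr]
      have hInv' : pvInvA g m n (rem.erase c) := by
        intro p hp hv0 hvrem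
        by_cases hv : pvCell g p.1 p.2 ∈ rem
        · have hvc : pvCell g p.1 p.2 = c := by
            by_contra hne
            exact hvrem ((hndr.mem_erase_iff).mpr ⟨hne, hv⟩)
          rw [hvc]
          exact hgood_of (by rw [← hvc]; exact hv0)
        · exact hInv p hp hv0 hv
      exact ih (rem.erase c) true (hndr.erase c) (List.Nodup.of_cons hndc)
        (fun x hx => (hndr.mem_erase_iff).mpr
          ⟨fun hxc => (List.nodup_cons.mp hndc).1 (hxc ▸ hx), hsubs x (List.mem_cons_of_mem _ hx)⟩)
        hInv' ((hndr.mem_erase_iff).mpr ⟨Ne.symm hcc0, hc0m⟩)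
    · rw [if_neg hcp]
      exact ih rem b hndr (List.Nodup.of_cons hndc)
        (fun x hx => hsubs x (List.mem_cons_of_mem _ hx)) hInv hc0m

-- ---- A-side loop lemmas ----

theorem pvLoopA_false {g : List (List Int)} {m n c0 : Int} (hm : m = (g.length : Int))
    (hn : ∀ row ∈ g, n ≤ (row.length : Int)) (h0m : 0 ≤ m) (h0n : 0 ≤ n)
    (hc0 : c0 ≠ 0) (hbad : ¬ pvGood g m n c0) :
    ∀ (fuel : Nat) (rem : List Int), rem.Nodup → pvInvA g m n rem → c0 ∈ rem →
      pvLoopA m n fuel (pvMaskF g n rem) rem = false := by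
  intro fuel
  induction fuel with
  | zero => intro rem _ _ _; rfl
  | succ fuel ih =>
    intro rem hnd hInv hc0m
    unfold pvLoopA
    have hne : rem.isEmpty = false := by
      rw [List.isEmpty_eq_false_iff_exists_mem]
      exact ⟨c0, hc0m⟩
    simp only [hne, Bool.false_eq_true, if_false]
    by_cases hf : (pvPassA m n rem (pvMaskF g n rem) rem false).2.2 = true
    · simp only [hf, if_true]
      have hmask := pvPassA_mask (g := g) m n rem rem false hnd
      have hpres := pvPassA_inv hm hn h0m h0n hc0 hbad rem rem false hnd hnd (fun _ h => h) hInv hc0m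
      have hnd' : (pvPassA m n rem (pvMaskF g n rem) rem false).2.1.Nodup :=
        (pvPassA_sublist m n rem (pvMaskF g n rem) rem false).nodup hnd
      rw [hmask]
      exact ih _ hnd' hpres.1 hpres.2
    · simp only [Bool.not_eq_true] at hf
      simp only [hf, Bool.false_eq_true, if_false]

theorem pvLoopA_true {g : List (List Int)} {m n : Int} (hm : m = (g.length : Int))
    (hn : ∀ row ∈ g, n ≤ (row.length : Int)) (h0m : 0 ≤ m) (h0n : 0 ≤ n) :
    ∀ (fuel : Nat) (rem : List Int), rem.Nodup → (∀ c ∈ rem, c ≠ 0 → pvGood g m n c) →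
      rem.length < fuel → pvLoopA m n fuel (pvMaskF g n rem) rem = true := by
  intro fuel
  induction fuel with
  | zero => intro rem _ _ h; omega
  | succ fuel ih =>
    intro rem hnd hGood hlen
    unfold pvLoopA
    by_cases he : rem = []
    · subst he
      simp
    · have hne : rem.isEmpty = false := by
        rw [List.isEmpty_eq_false_iff_exists_mem]
        exact ⟨_, List.exists_mem_of_ne_nil rem he |>.choose_spec⟩
      simp only [hne, Bool.false_eq_true, if_false]
      have hprog : ∃ c ∈ rem, pvCanPrintA (pvMaskF g n rem) m n c = true := by
        by_cases hnz : ∃ c ∈ rem, c ≠ 0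
        · obtain ⟨c, hc, hcz⟩ := hnz
          obtain ⟨c', hc', hc'0, hmin⟩ := pvGood_minimal (hGood c hc hcz) rem hc hcz
          exact ⟨c', hc', (pvCanPrintA_char hm hn h0m h0n hc'0 hc').mpr hmin⟩
        · push Not at hnz
          obtain ⟨x, hx⟩ := List.exists_mem_of_ne_nil rem he
          refine ⟨x, hx, ?_⟩
          rw [hnz x hx]
          apply pvCanPrintA_allzero h0m h0n
          intro p hp
          rw [show pvCell (pvMaskF g n rem) p.1 p.2
                = if pvCell g p.1 p.2 ∈ rem then pvCell g p.1 p.2 else 0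
              from pvCell_mask hm hn rem hp]
          split
          · next hvr => exact hnz _ hvr
          · rfl
      have hflag := pvPassA_flag_of m n rem (pvMaskF g n rem) rem false hprog
      simp only [hflag, if_true]
      have hmask := pvPassA_mask (g := g) m n rem rem false hnd
      have hsub := pvPassA_sublist m n rem (pvMaskF g n rem) rem false
      have hlt := pvPassA_len_lt m n rem (pvMaskF g n rem) rem (fun _ h => h) hflag
      rw [hmask]
      exact ih _ (hsub.nodup hnd) (fun c hc h0 => hGood c (hsub.subset hc) h0) (by omega)

-- ---- initial colour set of A ----

theorem pv_mem_colors {g : List (List Int)} {y : Int} :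
    y ∈ g.foldl (fun s row => PySem.Set.update s row) PySem.Set.empty ↔ ∃ row ∈ g, y ∈ row := by
  simpa using pv_mem_foldl_update g (fun row => row) PySem.Set.empty y

theorem pv_colors_nodup (g : List (List Int)) :
    (g.foldl (fun s row => PySem.Set.update s row) PySem.Set.empty).Nodup := by
  have h : ∀ (l : List (List Int)) (s : PySem.Set Int), s.Nodup →
      (l.foldl (fun s row => PySem.Set.update s row) s).Nodup := by
    intro l
    induction l with
    | nil => intro s hs; exact hs
    | cons row l ih =>
        intro s hs
        have h2 := PySem.Set.nodup_update (s := s) (xs := row) hs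
        exact ih _ h2
  exact h g PySem.Set.empty List.nodup_nil

-- ---- A characterisation ----

theorem pv_charA {r0 : List Int} {tl : List (List Int)} (hr0 : r0 ≠ [])
    (hpre : Pre_isPrintable_iterative_removal (r0 :: tl)) :
    (isPrintable_iterative_removal (r0 :: tl) = true ↔
      pvAllGood (r0 :: tl) (((r0 :: tl).length : Nat) : Int) ((r0.length : Nat) : Int)) := by
  have hn : ∀ row ∈ (r0 :: tl), ((r0.length : Nat) : Int) ≤ (row.length : Int) := by
    intro row hrow
    have := hpre row hrow
    simp only [List.headD_cons] at this
    exact_mod_cast this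
  have h0m : (0 : Int) ≤ (((r0 :: tl).length : Nat) : Int) := by positivity
  have h0n : (0 : Int) ≤ ((r0.length : Nat) : Int) := by positivity
  have hr0e : r0.isEmpty = false := by
    rw [List.isEmpty_eq_false_iff_exists_mem]
    exact ⟨_, (List.exists_mem_of_ne_nil r0 hr0).choose_spec⟩
  unfold isPrintable_iterative_removal
  simp only [hr0e, Bool.false_eq_true, if_false, PySem.List.len_eq]
  set colors := (r0 :: tl).foldl (fun s row => PySem.Set.update s row) PySem.Set.empty with hcolors
  have hmask : pvMaskF (r0 :: tl) ((r0.length : Nat) : Int) colors = (r0 :: tl) := by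
    apply pvMaskF_init rfl hn
    intro p hp
    rw [hcolors, pv_mem_colors]
    exact pvCell_visible rfl hn hp
  constructor
  · intro htrue
    by_contra hbadAll
    unfold pvAllGood at hbadAll
    push Not at hbadAll
    obtain ⟨p, hp, hv0, hbad⟩ := hbadAll
    have hc0m : pvCell (r0 :: tl) p.1 p.2 ∈ colors := by
      rw [hcolors, pv_mem_colors]
      exact pvCell_visible rfl hn hp
    have hInv : pvInvA (r0 :: tl) (((r0 :: tl).length : Nat) : Int) ((r0.length : Nat) : Int) colors := by
      intro q hq h0 hnotin
      exact absurd (by rw [hcolors, pv_mem_colors]; exact pvCell_visible rfl hn hq) hnotin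
    have hfalse := pvLoopA_false rfl hn h0m h0n hv0 hbad (colors.length + 1) colors
      (pv_colors_nodup _) hInv hc0m
    rw [hmask] at hfalse
    rw [htrue] at hfalse
    cases hfalse
  · intro hAll
    have hGoodRem : ∀ c ∈ colors, c ≠ 0 →
        pvGood (r0 :: tl) (((r0 :: tl).length : Nat) : Int) ((r0.length : Nat) : Int) c := by
      intro c hc hcz
      by_cases hMc : pvMatched (r0 :: tl) (((r0 :: tl).length : Nat) : Int) ((r0.length : Nat) : Int) c = []
      · exact pvGood_of_unmatched h0m hMc
      · obtain ⟨p, hpmem⟩ := List.exists_mem_of_ne_nil _ hMc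
        have hmat := pv_mem_matched.mp hpmem
        exact hmat.2 ▸ hAll p hmat.1 (by rw [hmat.2]; exact hcz)
    have htrue := pvLoopA_true rfl hn h0m h0n (colors.length + 1) colors
      (pv_colors_nodup _) hGoodRem (by omega)
    rw [hmask] at htrue
    exact htrue

-- ---- B-side: the boxes dictionary computes pvBoxOf ----

def pvUpd4 (st : Int × Int × Int × Int) (p : Int × Int) : Int × Int × Int × Int :=
  (min st.1 p.1, max st.2.1 p.1, min st.2.2.1 p.2, max st.2.2.2 p.2)

def pvOptStep (o : Option (Int × Int × Int × Int)) (p : Int × Int) : Option (Int × Int × Int × Int) :=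
  some (match o with
        | none => (p.1, p.1, p.2, p.2)
        | some st => pvUpd4 st p)

theorem pv_boxesB_step (g : List (List Int)) :
    (fun (d : PySem.Dict Int (Int × Int × Int × Int)) (p : Int × Int) =>
      let c := pvCell g p.1 p.2
      match d.get? c with
      | some (r0, r1, c0, c1) => d.insert c (min r0 p.1, max r1 p.1, min c0 p.2, max c1 p.2)
      | none => d.insert c (p.1, p.1, p.2, p.2))
    = (fun d p => d.insert (pvCell g p.1 p.2)
        ((pvOptStep (d.get? (pvCell g p.1 p.2)) p).getD (p.1, p.1, p.2, p.2))) := by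
  funext d p
  dsimp only
  cases hget : d.get? (pvCell g p.1 p.2) with
  | none => rfl
  | some st =>
    obtain ⟨r0, r1, c0, c1⟩ := st
    rfl

theorem pv_dict_fold_get? (g : List (List Int)) (L : List (Int × Int))
    (d : PySem.Dict Int (Int × Int × Int × Int)) (c : Int) :
    ((L.foldl (fun d p => d.insert (pvCell g p.1 p.2)
        ((pvOptStep (d.get? (pvCell g p.1 p.2)) p).getD (p.1, p.1, p.2, p.2))) d).get? c)
      = (L.filter (fun p => decide (pvCell g p.1 p.2 = c))).foldl pvOptStep (d.get? c) := by
  induction L generalizing d with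
  | nil => rfl
  | cons p L ih =>
    simp only [List.foldl_cons, List.filter_cons]
    by_cases hc : pvCell g p.1 p.2 = c
    · rw [if_pos (by simpa using hc)]
      rw [ih]
      simp only [List.foldl_cons]
      congr 1
      rw [← hc]
      rw [PySem.Dict.get?_insert_self]
      cases d.get? (pvCell g p.1 p.2) <;> rfl
    · rw [if_neg (by simpa using hc)]
      rw [ih]
      congr 1
      rw [PySem.Dict.get?_insert]
      rw [if_neg (fun h => hc h.symm)]

theorem pv_optfold_some (M : List (Int × Int)) (st : Int × Int × Int × Int) :
    M.foldl pvOptStep (some st) = some (M.foldl pvUpd4 st) := by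
  induction M generalizing st with
  | nil => rfl
  | cons p M ih =>
    simp only [List.foldl_cons]
    have h1 : pvOptStep (some st) p = some (pvUpd4 st p) := rfl
    rw [h1, ih]

theorem pv_optfold_box4 {m n : Int} {M : List (Int × Int)} (hM : M ≠ [])
    (hbnd : ∀ p ∈ M, 0 ≤ p.1 ∧ p.1 < m ∧ 0 ≤ p.2 ∧ p.2 < n) :
    M.foldl pvOptStep none = some (pvBox4 m n M) := by
  cases M with
  | nil => exact absurd rfl hM
  | cons p M' =>
    obtain ⟨hb1, hb2, hb3, hb4⟩ := hbnd p List.mem_cons_self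
    simp only [List.foldl_cons]
    have h1 : pvOptStep none p = some (p.1, p.1, p.2, p.2) := rfl
    rw [h1, pv_optfold_some]
    congr 1
    have hupd : pvUpd4 = (fun (st : Int × Int × Int × Int) (q : Int × Int) =>
        (min st.1 q.1, max st.2.1 q.1, min st.2.2.1 q.2, max st.2.2.2 q.2)) := rfl
    rw [hupd, pv_foldl4_split]
    unfold pvBox4
    simp only [List.foldl_cons]
    rw [min_eq_right (by omega : p.1 ≤ m), max_eq_right (by omega : (-1 : Int) ≤ p.1),
        min_eq_right (by omega : p.2 ≤ n), max_eq_right (by omega : (-1 : Int) ≤ p.2)]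

theorem pvBoxesB_get? {g : List (List Int)} {m n : Int} (hm : m = (g.length : Int))
    (hn : ∀ row ∈ g, n ≤ (row.length : Int)) (c : Int) :
    (pvBoxesB g m n).get? c =
      if pvMatched g m n c = [] then none else some (pvBoxOf g m n c) := by
  unfold pvBoxesB
  rw [pv_foldl_cells]
  rw [pv_boxesB_step g]
  rw [pv_dict_fold_get?]
  have hget : PySem.Dict.empty.get? c = (none : Option (Int × Int × Int × Int)) :=
    PySem.Dict.get?_empty c
  rw [hget]
  show (pvMatched g m n c).foldl pvOptStep none = _
  by_cases hM : pvMatched g m n c = []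
  · rw [if_pos hM, hM]
    rfl
  · rw [if_neg hM]
    have hbnd : ∀ q ∈ pvMatched g m n c, 0 ≤ q.1 ∧ q.1 < m ∧ 0 ≤ q.2 ∧ q.2 < n :=
      fun q hq => pv_mem_cells.mp (pv_mem_matched.mp hq).1
    rw [pv_optfold_box4 hM hbnd]
    rfl

theorem pvBoxesB_keys_nodup (g : List (List Int)) (m n : Int) :
    (pvBoxesB g m n).keys.Nodup := by
  unfold pvBoxesB
  rw [pv_foldl_cells]
  rw [pv_boxesB_step g]
  exact PySem.Dict.nodup_keys_foldl_insert_key _ _ _ _ (by simp [PySem.Dict.keys_empty])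

-- the deps dictionary of port B: keys and lookups
theorem pvDepsD_items {g : List (List Int)} (m n : Int) :
    ((pvBoxesB g m n).items.foldl (fun d p => d.insert p.1 (pvDepsOfBoxB g p.1 p.2)) PySem.Dict.empty).items
      = (pvBoxesB g m n).items.map (fun p => (p.1, pvDepsOfBoxB g p.1 p.2)) := by
  rw [PySem.Dict.items_foldl_insert_fresh (pvBoxesB g m n).items Prod.fst
      (fun p => pvDepsOfBoxB g p.1 p.2) PySem.Dict.empty
      (fun a _ => PySem.Dict.contains_empty a.1) (pvBoxesB_keys_nodup g m n)]
  have h1 : (PySem.Dict.empty : PySem.Dict Int (PySem.Set Int)).items = [] := rfl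
  rw [h1, List.nil_append]

theorem pvDepsD_keys_nodup {g : List (List Int)} (m n : Int) :
    ((pvBoxesB g m n).items.foldl (fun d p => d.insert p.1 (pvDepsOfBoxB g p.1 p.2)) PySem.Dict.empty).keys.Nodup := by
  exact PySem.Dict.nodup_keys_foldl_insert_key _ _ _ _ (by simp [PySem.Dict.keys_empty])

theorem pvDepsD_mem_keys {g : List (List Int)} {m n : Int} (hm : m = (g.length : Int))
    (hn : ∀ row ∈ g, n ≤ (row.length : Int)) (c : Int) :
    (c ∈ ((pvBoxesB g m n).items.foldl (fun d p => d.insert p.1 (pvDepsOfBoxB g p.1 p.2)) PySem.Dict.empty).keys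
      ↔ pvMatched g m n c ≠ []) := by
  rw [PySem.Dict.keys_foldl_insert_key]
  have h1 : (PySem.Dict.empty : PySem.Dict Int (PySem.Set Int)).keys = PySem.Set.empty := rfl
  rw [h1, PySem.Set.update_empty, PySem.Set.mem_ofList]
  have h2 : (pvBoxesB g m n).items.map Prod.fst = (pvBoxesB g m n).keys := rfl
  rw [h2]
  constructor
  · intro hc hM
    have h3 : (pvBoxesB g m n).get? c = none := by
      rw [pvBoxesB_get? hm hn c, if_pos hM]
    exact (PySem.Dict.get?_eq_none_iff_not_mem_keys (pvBoxesB g m n) c).mp h3 hc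
  · intro hM
    by_contra hc
    have h3 : (pvBoxesB g m n).get? c = none :=
      (PySem.Dict.get?_eq_none_iff_not_mem_keys (pvBoxesB g m n) c).mpr hc
    rw [pvBoxesB_get? hm hn c, if_neg hM] at h3
    cases h3

theorem pvDepsD_getD {g : List (List Int)} {m n : Int} (hm : m = (g.length : Int))
    (hn : ∀ row ∈ g, n ≤ (row.length : Int)) {c : Int} (hc : pvMatched g m n c ≠ []) :
    ((pvBoxesB g m n).items.foldl (fun d p => d.insert p.1 (pvDepsOfBoxB g p.1 p.2)) PySem.Dict.empty).getD c PySem.Set.empty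
      = pvDepsL g m n c := by
  have hbox : (pvBoxesB g m n).get? c = some (pvBoxOf g m n c) := by
    rw [pvBoxesB_get? hm hn c, if_neg hc]
  have hmem := PySem.Dict.mem_items_of_get?_eq_some _ hbox
  have hmem2 : (c, pvDepsOfBoxB g c (pvBoxOf g m n c)) ∈
      ((pvBoxesB g m n).items.foldl (fun d p => d.insert p.1 (pvDepsOfBoxB g p.1 p.2)) PySem.Dict.empty).items := by
    rw [pvDepsD_items]
    exact List.mem_map.mpr ⟨(c, pvBoxOf g m n c), hmem, rfl⟩
  exact PySem.Dict.getD_of_mem_items _ hmem2 (pvDepsD_keys_nodup m n) _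

-- ---- B-side pass lemmas ----

theorem pvPassB_still_sublist (deps : PySem.Dict Int (PySem.Set Int)) (cs : List Int) (removed : PySem.Set Int) :
    (pvPassB deps cs removed).1.Sublist cs := by
  induction cs generalizing removed with
  | nil => exact List.Sublist.refl _
  | cons c cs ih =>
    unfold pvPassB
    split
    · exact (ih _).trans (List.sublist_cons_self c cs)
    · exact (ih _).cons₂ c

theorem pvPassB_removed_mono (deps : PySem.Dict Int (PySem.Set Int)) (cs : List Int) (removed : PySem.Set Int) :
    ∀ x ∈ removed, x ∈ (pvPassB deps cs removed).2 := by
  induction cs generalizing removed with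
  | nil => intro x hx; exact hx
  | cons c cs ih =>
    intro x hx
    unfold pvPassB
    split
    · exact ih _ x ((PySem.Set.mem_add removed c x).mpr (Or.inl hx))
    · exact ih _ x hx

theorem pvPassB_compl (deps : PySem.Dict Int (PySem.Set Int)) (cs : List Int) (removed : PySem.Set Int) :
    ∀ x ∈ cs, x ∈ (pvPassB deps cs removed).1 ∨ x ∈ (pvPassB deps cs removed).2 := by
  induction cs generalizing removed with
  | nil => intro x hx; cases hx
  | cons c cs ih =>
    intro x hx
    unfold pvPassB
    split
    · rcases List.mem_cons.mp hx with rfl | hx'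
      · exact Or.inr (pvPassB_removed_mono deps cs _ x ((PySem.Set.mem_add removed x x).mpr (Or.inr rfl)))
      · exact ih _ x hx'
    · rcases List.mem_cons.mp hx with rfl | hx'
      · exact Or.inl List.mem_cons_self
      · rcases ih _ x hx' with h | h
        · exact Or.inl (List.mem_cons_of_mem _ h)
        · exact Or.inr h

theorem pvPassB_len_le (deps : PySem.Dict Int (PySem.Set Int)) (cs : List Int) (removed : PySem.Set Int) :
    (pvPassB deps cs removed).1.length ≤ cs.length := by
  induction cs generalizing removed with
  | nil => simp [pvPassB]
  | cons c cs ih =>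
    unfold pvPassB
    split
    · exact le_trans (ih _) (Nat.le_succ _)
    · simpa using ih _

theorem pvPassB_len_lt (deps : PySem.Dict Int (PySem.Set Int)) (cs : List Int) (removed : PySem.Set Int)
    (h : ∃ c ∈ cs, PySem.Set.issubset (deps.getD c PySem.Set.empty) removed = true) :
    (pvPassB deps cs removed).1.length < cs.length := by
  induction cs generalizing removed with
  | nil => obtain ⟨c, hc, _⟩ := h; cases hc
  | cons c cs ih =>
    obtain ⟨c', hc', hchk⟩ := h
    unfold pvPassB
    by_cases hck : PySem.Set.issubset (deps.getD c PySem.Set.empty) removed = true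
    · rw [if_pos hck]
      have := pvPassB_len_le deps cs (PySem.Set.add removed c)
      simpa using Nat.lt_succ_of_le this
    · rw [if_neg hck]
      rcases List.mem_cons.mp hc' with rfl | hc''
      · exact absurd hchk hck
      · have := ih removed ⟨c', hc'', hchk⟩
        simpa using Nat.succ_lt_succ this

-- invariant for the 'B returns False' direction
theorem pvPassB_inv {g : List (List Int)} {m n c0 : Int} (hm : m = (g.length : Int))
    (hn : ∀ row ∈ g, n ≤ (row.length : Int)) (h0m : 0 ≤ m) (h0n : 0 ≤ n)
    (hc0 : c0 ≠ 0) (hbad : ¬ pvGood g m n c0)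
    (deps : PySem.Dict Int (PySem.Set Int))
    (hdeps : ∀ c ∈ deps.keys, deps.getD c PySem.Set.empty = pvDepsL g m n c) :
    ∀ (cs : List Int) (removed : PySem.Set Int), (∀ c ∈ cs, c ∈ deps.keys) →
      (∀ v ∈ removed, v ≠ 0 → pvGood g m n v) →
      (∀ v ∈ (pvPassB deps cs removed).2, v ≠ 0 → pvGood g m n v) ∧
        (c0 ∈ cs → c0 ∈ (pvPassB deps cs removed).1) := by
  intro cs
  induction cs with
  | nil => intro removed _ hInv; exact ⟨hInv, fun h => absurd h (List.not_mem_nil)⟩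
  | cons c cs ih =>
    intro removed hkeys hInv
    unfold pvPassB
    by_cases hchk : PySem.Set.issubset (deps.getD c PySem.Set.empty) removed = true
    · rw [if_pos hchk]
      have hGoodc : c ≠ 0 → pvGood g m n c := by
        intro hcz
        rw [hdeps c (hkeys c List.mem_cons_self)] at hchk
        rw [PySem.Set.issubset_iff] at hchk
        constructor
        intro d hd
        exact hInv d (hchk d hd) (pv_depsL_ne hd).2
      have hInv' : ∀ v ∈ PySem.Set.add removed c, v ≠ 0 → pvGood g m n v := by
        intro v hv hvz
        rcases (PySem.Set.mem_add removed c v).mp hv with h | rfl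
        · exact hInv v h hvz
        · exact hGoodc hvz
      have hih := ih (PySem.Set.add removed c) (fun x hx => hkeys x (List.mem_cons_of_mem _ hx)) hInv'
      refine ⟨hih.1, fun hc0m => ?_⟩
      rcases List.mem_cons.mp hc0m with rfl | hc0cs
      · exact absurd (hGoodc hc0) hbad
      · exact hih.2 hc0cs
    · rw [if_neg hchk]
      have hih := ih removed (fun x hx => hkeys x (List.mem_cons_of_mem _ hx)) hInv
      refine ⟨hih.1, fun hc0m => ?_⟩
      rcases List.mem_cons.mp hc0m with rfl | hc0cs
      · exact List.mem_cons_self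
      · exact List.mem_cons_of_mem _ (hih.2 hc0cs)

-- ---- B-side loop lemmas ----

theorem pvLoopB_false {g : List (List Int)} {m n c0 : Int} (hm : m = (g.length : Int))
    (hn : ∀ row ∈ g, n ≤ (row.length : Int)) (h0m : 0 ≤ m) (h0n : 0 ≤ n)
    (hc0 : c0 ≠ 0) (hbad : ¬ pvGood g m n c0)
    (deps : PySem.Dict Int (PySem.Set Int))
    (hdeps : ∀ c ∈ deps.keys, deps.getD c PySem.Set.empty = pvDepsL g m n c) :
    ∀ (fuel : Nat) (rem : List Int) (removed : PySem.Set Int), (∀ c ∈ rem, c ∈ deps.keys) →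
      (∀ v ∈ removed, v ≠ 0 → pvGood g m n v) → c0 ∈ rem →
      pvLoopB deps fuel rem removed = false := by
  intro fuel
  induction fuel with
  | zero => intro rem removed _ _ _; rfl
  | succ fuel ih =>
    intro rem removed hkeys hInv hc0m
    unfold pvLoopB
    have hne : rem.isEmpty = false := by
      rw [List.isEmpty_eq_false_iff_exists_mem]
      exact ⟨c0, hc0m⟩
    simp only [hne, Bool.false_eq_true, if_false]
    by_cases hstall : (pvPassB deps rem removed).1.length = rem.length
    · simp only [hstall, if_pos]
    · rw [if_neg hstall]
      have hpres := pvPassB_inv hm hn h0m h0n hc0 hbad deps hdeps rem removed hkeys hInv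
      have hsub := pvPassB_still_sublist deps rem removed
      exact ih _ _ (fun x hx => hkeys x (hsub.subset hx)) hpres.1 (hpres.2 hc0m)

theorem pvLoopB_true {g : List (List Int)} {m n : Int} (hm : m = (g.length : Int))
    (hn : ∀ row ∈ g, n ≤ (row.length : Int)) (h0m : 0 ≤ m) (h0n : 0 ≤ n)
    (deps : PySem.Dict Int (PySem.Set Int))
    (hdeps : ∀ c ∈ deps.keys, deps.getD c PySem.Set.empty = pvDepsL g m n c)
    (hkeys : ∀ c : Int, c ∈ deps.keys ↔ pvMatched g m n c ≠ [])
    (hAll : pvAllGood g m n) :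
    ∀ (fuel : Nat) (rem : List Int) (removed : PySem.Set Int), rem.Nodup →
      (∀ c ∈ rem, c ∈ deps.keys) →
      (∀ c ∈ deps.keys, c ∈ rem ∨ c ∈ removed) →
      rem.length < fuel →
      pvLoopB deps fuel rem removed = true := by
  intro fuel
  induction fuel with
  | zero => intro rem removed _ _ _ h; omega
  | succ fuel ih =>
    intro rem removed hnd hsubk hcompl hlen
    unfold pvLoopB
    by_cases he : rem = []
    · subst he
      simp
    · have hne : rem.isEmpty = false := by
        rw [List.isEmpty_eq_false_iff_exists_mem]
        exact ⟨_, (List.exists_mem_of_ne_nil rem he).choose_spec⟩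
      simp only [hne, Bool.false_eq_true, if_false]
      have hGoodRem : ∀ c ∈ rem, c ≠ 0 → pvGood g m n c := by
        intro c hc hcz
        obtain ⟨p, hpmem⟩ := List.exists_mem_of_ne_nil _ ((hkeys c).mp (hsubk c hc))
        have hmat := pv_mem_matched.mp hpmem
        exact hmat.2 ▸ hAll p hmat.1 (by rw [hmat.2]; exact hcz)
      have hdep_removed : ∀ c' ∈ rem, (∀ d ∈ pvDepsL g m n c', d ∉ rem) →
          PySem.Set.issubset (deps.getD c' PySem.Set.empty) removed = true := by
        intro c' hc' hnd'
        rw [hdeps c' (hsubk c' hc'), PySem.Set.issubset_iff]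
        intro d hd
        have hdL := hd
        rw [pv_mem_depsL hm hn h0m h0n] at hd
        obtain ⟨_, _, p, hp, _, hval⟩ := hd
        have hdM : pvMatched g m n d ≠ [] :=
          List.ne_nil_of_mem (pv_mem_matched.mpr ⟨hp, hval⟩)
        rcases hcompl d ((hkeys d).mpr hdM) with h | h
        · exact absurd h (hnd' d hdL)
        · exact h
      have hprog : ∃ c' ∈ rem, PySem.Set.issubset (deps.getD c' PySem.Set.empty) removed = true := by
        by_cases hnz : ∃ c ∈ rem, c ≠ 0
        · obtain ⟨c, hc, hcz⟩ := hnz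
          obtain ⟨c', hc', hc'z, hmin⟩ := pvGood_minimal (hGoodRem c hc hcz) rem hc hcz
          exact ⟨c', hc', hdep_removed c' hc' hmin⟩
        · push Not at hnz
          obtain ⟨x, hx⟩ := List.exists_mem_of_ne_nil rem he
          exact ⟨x, hx, hdep_removed x hx
            (fun d hd hdr => (pv_depsL_ne hd).2 (hnz d hdr))⟩
      have hlt := pvPassB_len_lt deps rem removed hprog
      rw [if_neg (by omega)]
      have hsub := pvPassB_still_sublist deps rem removed
      refine ih _ _ (hsub.nodup hnd) (fun x hx => hsubk x (hsub.subset hx)) ?_ (by omega)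
      intro c hck
      rcases hcompl c hck with h | h
      · exact pvPassB_compl deps rem removed c h
      · exact Or.inr (pvPassB_removed_mono deps rem removed c h)

theorem pv_charB {r0 : List Int} {tl : List (List Int)} (hr0 : r0 ≠ [])
    (hpre : Pre_isPrintable_iterative_removal (r0 :: tl)) :
    (isPrintable_iterative_removal_alt (r0 :: tl) = true ↔
      pvAllGood (r0 :: tl) (((r0 :: tl).length : Nat) : Int) ((r0.length : Nat) : Int)) := by
  have hn : ∀ row ∈ (r0 :: tl), ((r0.length : Nat) : Int) ≤ (row.length : Int) := by
    intro row hrow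
    have := hpre row hrow
    simp only [List.headD_cons] at this
    exact_mod_cast this
  have h0m : (0 : Int) ≤ (((r0 :: tl).length : Nat) : Int) := by positivity
  have h0n : (0 : Int) ≤ ((r0.length : Nat) : Int) := by positivity
  have hr0e : r0.isEmpty = false := by
    rw [List.isEmpty_eq_false_iff_exists_mem]
    exact ⟨_, (List.exists_mem_of_ne_nil r0 hr0).choose_spec⟩
  unfold isPrintable_iterative_removal_alt
  simp only [hr0e, Bool.false_eq_true, if_false, PySem.List.len_eq]
  set D := ((pvBoxesB (r0 :: tl) (((r0 :: tl).length : Nat) : Int) ((r0.length : Nat) : Int)).items.foldl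
      (fun d p => d.insert p.1 (pvDepsOfBoxB (r0 :: tl) p.1 p.2)) PySem.Dict.empty) with hD
  have hdeps : ∀ c ∈ D.keys, D.getD c PySem.Set.empty
      = pvDepsL (r0 :: tl) (((r0 :: tl).length : Nat) : Int) ((r0.length : Nat) : Int) c := by
    intro c hc
    have hM := (pvDepsD_mem_keys rfl hn c).mp hc
    exact pvDepsD_getD rfl hn hM
  have hkeys : ∀ c : Int, c ∈ D.keys ↔
      pvMatched (r0 :: tl) (((r0 :: tl).length : Nat) : Int) ((r0.length : Nat) : Int) c ≠ [] :=
    fun c => pvDepsD_mem_keys rfl hn c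
  constructor
  · intro htrue
    by_contra hbadAll
    unfold pvAllGood at hbadAll
    push Not at hbadAll
    obtain ⟨p, hp, hv0, hbad⟩ := hbadAll
    have hdM : pvMatched (r0 :: tl) (((r0 :: tl).length : Nat) : Int) ((r0.length : Nat) : Int)
        (pvCell (r0 :: tl) p.1 p.2) ≠ [] :=
      List.ne_nil_of_mem (pv_mem_matched.mpr ⟨hp, rfl⟩)
    have hc0k : pvCell (r0 :: tl) p.1 p.2 ∈ D.keys := (hkeys _).mpr hdM
    have hfalse := pvLoopB_false rfl hn h0m h0n hv0 hbad D hdeps (D.keys.length + 1) D.keys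
      PySem.Set.empty (fun _ h => h) (fun v hv => absurd hv (List.not_mem_nil)) hc0k
    rw [htrue] at hfalse
    cases hfalse
  · intro hAll
    exact pvLoopB_true rfl hn h0m h0n D hdeps hkeys hAll (D.keys.length + 1) D.keys
      PySem.Set.empty (pvDepsD_keys_nodup _ _) (fun _ h => h) (fun c hc => Or.inl hc) (by omega)

-- ===== VERDICT placeholder below =====

theorem isPrintable_iterative_removal_spec : Claim_equal_isPrintable_iterative_removal := by
  intro targetGrid _hdom hpre
  unfold Spec_isPrintable_iterative_removal
  match targetGrid, hpre with
  | [], _ => rfl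
  | (r0 :: tl), hpre =>
    by_cases hr0 : r0 = []
    · subst hr0
      rfl
    · have hA := pv_charA hr0 hpre
      have hB := pv_charB hr0 hpre
      have hAB := hA.trans hB.symm
      cases hA' : isPrintable_iterative_removal (r0 :: tl) <;>
        cases hB' : isPrintable_iterative_removal_alt (r0 :: tl) <;> simp_all
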